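-- pv_equiv track=rewrite | github.com/limachara/EGE_2024 | task5CC2816/5CCr-7.py | f
-- ===== SOURCE A (Python) =====
-- def f(n):
--     a = []
--     while n > 0:
--         a.append(n % 45)
--         n //= 45
--     s_even = s_odd = 0
--     for i in range(1, len(a) + 1):
--         if i % 2 == 0:
--             s_even += a[-i]
--         else:
--             s_odd += a[-i]
--     if min(s_even, s_odd) > 0:
--         a.append(min(s_even, s_odd))
--     a.insert(0, max(s_even, s_odd))
--     r = 0
--     for i in range(len(a)):
--         r += a[i]*45**i
--     return r
-- ===== SOURCE B (Python) =====
-- def f(n):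
--     # closed form: digit-count + two parity sums, no list, no power-sum loop
--     m = n if n > 0 else 0
--     t, d, s0, s1 = m, 0, 0, 0
--     while t > 0:
--         if d % 2 == 0:
--             s0 += t % 45
--         else:
--             s1 += t % 45
--         t //= 45
--         d += 1
--     hi, lo = max(s0, s1), min(s0, s1)
--     r = hi + 45 * m
--     if lo > 0:
--         r += lo * 45 ** (d + 1)
--     return r
-- ===== Notes on version B (the rewrite author's own statement) =====
-- stated objective: simpler
-- what changed: B keeps only the digit-extraction loop (tracking the digit count d and the two alternating parity sums, no list) and computes the result in closed form hi + base*m + lo*base^(d+1), eliminating A's list building, negative-index scan and power-sum loop.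
import Mathlib
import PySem

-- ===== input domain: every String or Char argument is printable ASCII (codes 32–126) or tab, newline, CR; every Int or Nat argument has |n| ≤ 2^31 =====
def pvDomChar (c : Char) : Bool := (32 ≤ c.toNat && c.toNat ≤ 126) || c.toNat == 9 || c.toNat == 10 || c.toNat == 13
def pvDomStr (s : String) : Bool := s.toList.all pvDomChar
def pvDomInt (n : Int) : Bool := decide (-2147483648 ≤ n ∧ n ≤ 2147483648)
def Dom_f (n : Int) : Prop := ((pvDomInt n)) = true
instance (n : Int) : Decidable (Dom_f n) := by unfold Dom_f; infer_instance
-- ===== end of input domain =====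

-- B computes the same value without the digit list and without the power-sum loop
-- (closed form hi + 45*m + lo*45^(d+1)); proved equal to A on all ints.

-- ===== PORT A =====
-- while n > 0: a.append(n % 45); n //= 45   (loop state (n, a))
def fLoopA (n : Int) (a : List Int) : List Int :=
  if h : n > 0 then fLoopA (PySem.Int.floordiv n 45) (a ++ [PySem.Int.mod n 45]) else a
termination_by n.toNat
decreasing_by
  have hid := PySem.Int.floordiv_mul_add_mod n 45
  have hm1 : 0 ≤ PySem.Int.mod n 45 := PySem.Int.mod_nonneg _ (by norm_num)
  have hm2 : PySem.Int.mod n 45 < 45 := PySem.Int.mod_lt _ (by norm_num)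
  omega

def f (n : Int) : Int :=
  let a := fLoopA n []
  -- for i in range(1, len(a)+1): parity of i decides s_even/s_odd; a[-i] is always in
  -- range here, so pyGetD is exact
  let s := (PySem.List.pyRange 1 ((a.length : Int) + 1) 1).foldl
    (fun (s : Int × Int) i =>
      if PySem.Int.mod i 2 = 0 then (s.1 + PySem.List.pyGetD a (-i) 0, s.2)
      else (s.1, s.2 + PySem.List.pyGetD a (-i) 0)) (0, 0)
  let s_even := s.1
  let s_odd := s.2
  let a2 := if min s_even s_odd > 0 then a ++ [min s_even s_odd] else a
  -- a.insert(0, max(...)) = cons at the front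
  let a3 := max s_even s_odd :: a2
  -- for i in range(len(a)): r += a[i]*45**i   (i ≥ 0 throughout, so ^i.toNat is exact)
  (PySem.List.pyRange 0 (a3.length : Int) 1).foldl
    (fun r i => r + PySem.List.pyGetD a3 i 0 * 45 ^ i.toNat) 0

-- ===== PORT B =====
-- while t > 0: add t % 45 to s0/s1 by parity of d; t //= 45; d += 1
def fLoopB (t d s0 s1 : Int) : Int × Int × Int :=
  if h : t > 0 then
    if PySem.Int.mod d 2 = 0 then
      fLoopB (PySem.Int.floordiv t 45) (d + 1) (s0 + PySem.Int.mod t 45) s1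
    else
      fLoopB (PySem.Int.floordiv t 45) (d + 1) s0 (s1 + PySem.Int.mod t 45)
  else (d, s0, s1)
termination_by t.toNat
decreasing_by
  all_goals
    have hid := PySem.Int.floordiv_mul_add_mod t 45
    have hm1 : 0 ≤ PySem.Int.mod t 45 := PySem.Int.mod_nonneg _ (by norm_num)
    have hm2 : PySem.Int.mod t 45 < 45 := PySem.Int.mod_lt _ (by norm_num)
    omega

def f_alt (n : Int) : Int :=
  let m := if n > 0 then n else 0
  let res := fLoopB m 0 0 0
  let d := res.1
  let s0 := res.2.1
  let s1 := res.2.2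
  let hi := max s0 s1
  let lo := min s0 s1
  let r := hi + 45 * m
  if lo > 0 then r + lo * 45 ^ (d + 1).toNat else r

-- ===== PRECONDITION & SPEC =====
def Spec_f (n : Int) (out : Int) : Prop := out = f_alt n
instance (n : Int) (out : Int) : Decidable (Spec_f n out) := by unfold Spec_f; infer_instance

-- ===== CLAIM (what is proved, stated in full; the proofs are below) =====
def Claim_equal_f : Prop := ∀ (n : Int), Dom_f n → Spec_f n (f n)

-- ===== LEMMAS AND PROOFS =====

-- the base-45 digit list of n (little-endian), the mathematical object both loops traverse
def mdig (n : Int) : List Int :=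
  if h : n > 0 then PySem.Int.mod n 45 :: mdig (PySem.Int.floordiv n 45) else []
termination_by n.toNat
decreasing_by
  have hid := PySem.Int.floordiv_mul_add_mod n 45
  have hm1 : 0 ≤ PySem.Int.mod n 45 := PySem.Int.mod_nonneg _ (by norm_num)
  have hm2 : PySem.Int.mod n 45 < 45 := PySem.Int.mod_lt _ (by norm_num)
  omega

-- (sum of entries at even 0-based positions, sum at odd positions)
def asum : List Int → Int × Int
  | [] => (0, 0)
  | x :: xs => (x + (asum xs).2, (asum xs).1)

-- base-45 polynomial value of a little-endian digit list
def pval : List Int → Int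
  | [] => 0
  | x :: xs => x + 45 * pval xs

lemma mdig_pos {n : Int} (h : n > 0) :
    mdig n = PySem.Int.mod n 45 :: mdig (PySem.Int.floordiv n 45) := by
  rw [mdig]; simp [h]

lemma mdig_nonpos {n : Int} (h : ¬ n > 0) : mdig n = [] := by
  rw [mdig]; simp [h]

lemma fLoopA_eq (n : Int) (acc : List Int) : fLoopA n acc = acc ++ mdig n := by
  induction n, acc using fLoopA.induct with
  | case1 n acc h ih =>
      rw [fLoopA, mdig]; simp [h] at ih ⊢; simp [ih]
  | case2 n acc h =>
      rw [fLoopA, mdig]; simp [h]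

lemma pval_mdig {n : Int} (h : 0 ≤ n) : pval (mdig n) = n := by
  induction n using mdig.induct with
  | case1 n hpos ih =>
      have hfd : PySem.Int.floordiv n 45 = n / 45 :=
        PySem.Int.floordiv_eq_ediv_of_pos (by norm_num)
      have h3 : 0 ≤ n / 45 := Int.ediv_nonneg (by omega) (by norm_num)
      rw [mdig_pos hpos, pval, ih (by omega)]
      have := PySem.Int.floordiv_mul_add_mod n 45
      omega
  | case2 n hpos => rw [mdig_nonpos hpos, pval]; omega

lemma pval_append (L : List Int) (x : Int) :
    pval (L ++ [x]) = pval L + x * 45 ^ L.length := by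
  induction L with
  | nil => simp [pval]
  | cons y ys ih => simp [pval, ih, pow_succ]; ring

lemma asum_append (M : List Int) (x : Int) :
    asum (M ++ [x]) =
      if M.length % 2 = 0 then ((asum M).1 + x, (asum M).2)
      else ((asum M).1, (asum M).2 + x) := by
  induction M with
  | nil => simp [asum]
  | cons y ys ih =>
      simp only [List.cons_append, asum, ih, List.length_cons]
      rcases Nat.mod_two_eq_zero_or_one ys.length with hp | hp <;>
        simp [hp, Nat.succ_mod_two_eq_zero_iff, Prod.ext_iff] <;> omega

lemma asum_reverse (L : List Int) :
    asum L.reverse =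
      if L.length % 2 = 0 then ((asum L).2, (asum L).1) else asum L := by
  induction L with
  | nil => simp [asum]
  | cons x xs ih =>
      simp only [List.reverse_cons, asum_append, ih, List.length_reverse, List.length_cons, asum]
      rcases Nat.mod_two_eq_zero_or_one xs.length with hp | hp <;>
        simp [hp, Nat.succ_mod_two_eq_zero_iff, Prod.ext_iff] <;> omega

-- A's parity-sum loop, generalized over the start index
lemma foldS_aux (L : List Int) (m : Nat) : ∀ (k : Nat), L.length - k = m → k ≤ L.length →
    ∀ (se so : Int),
    (PySem.List.pyRange ((k : Int) + 1) ((L.length : Int) + 1) 1).foldl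
      (fun (s : Int × Int) i =>
        if PySem.Int.mod i 2 = 0 then (s.1 + PySem.List.pyGetD L (-i) 0, s.2)
        else (s.1, s.2 + PySem.List.pyGetD L (-i) 0)) (se, so)
    = (if k % 2 = 0
        then (se + (asum (L.reverse.drop k)).2, so + (asum (L.reverse.drop k)).1)
        else (se + (asum (L.reverse.drop k)).1, so + (asum (L.reverse.drop k)).2)) := by
  induction m with
  | zero =>
      intro k hm hk se so
      rw [PySem.List.pyRange_one_eq_nil (by omega)]
      have hnil : L.reverse.drop k = [] := List.drop_eq_nil_of_le (by simp; omega)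
      simp [hnil, asum]
  | succ m ih =>
      intro k hm hk se so
      have hlt : k < L.length := by omega
      have hkr : k < L.reverse.length := by simp; omega
      rw [PySem.List.pyRange_one_cons (by omega)]
      simp only [List.foldl_cons]
      have e1 : PySem.Int.mod ((k : Int) + 1) 2 = ((k : Int) + 1) % 2 :=
        PySem.Int.mod_eq_emod_of_pos (by norm_num)
      have hget : PySem.List.pyGetD L (-((k : Int) + 1)) 0 = L.reverse[k] := by
        rw [show -((k : Int) + 1) = -(((k + 1 : Nat)) : Int) by push_cast; ring]
        rw [PySem.List.pyGetD_neg_natCast L (k + 1) 0 (by omega) (by omega)]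
        rw [List.getElem_reverse]
        have hix : L.length - (k + 1) = L.length - 1 - k := by omega
        simp [hix]
      have hdrop : L.reverse.drop k = L.reverse[k] :: L.reverse.drop (k + 1) :=
        List.drop_eq_getElem_cons hkr
      have hstep : ((k : Int) + 1 + 1) = (((k + 1 : Nat) : Int) + 1) := by push_cast; ring
      by_cases hkp : k % 2 = 0
      · have hp : ¬ (PySem.Int.mod ((k : Int) + 1) 2 = 0) := by rw [e1]; omega
        rw [if_neg hp, hget, hstep, ih (k + 1) (by omega) (by omega)]
        rw [if_neg (by omega : ¬ ((k + 1) % 2 = 0)), if_pos hkp, hdrop]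
        simp [asum, Prod.ext_iff]
        omega
      · have hp : PySem.Int.mod ((k : Int) + 1) 2 = 0 := by rw [e1]; omega
        rw [if_pos hp, hget, hstep, ih (k + 1) (by omega) (by omega)]
        rw [if_pos (by omega : (k + 1) % 2 = 0), if_neg hkp, hdrop]
        simp [asum, Prod.ext_iff]
        omega

-- B's loop computes the digit count and the two position-parity sums
lemma foldB (t d s0 s1 : Int) :
    fLoopB t d s0 s1 =
      (d + (mdig t).length,
        if PySem.Int.mod d 2 = 0
          then (s0 + (asum (mdig t)).1, s1 + (asum (mdig t)).2)
          else (s0 + (asum (mdig t)).2, s1 + (asum (mdig t)).1)) := by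
  have e2 : ∀ x : Int, PySem.Int.mod x 2 = x % 2 :=
    fun x => PySem.Int.mod_eq_emod_of_pos (by norm_num)
  induction t, d, s0, s1 using fLoopB.induct with
  | case1 t d s0 s1 ht hd ih =>
      rw [fLoopB, dif_pos ht, if_pos hd, ih, mdig_pos ht]
      have hd1 : ¬ (PySem.Int.mod (d + 1) 2 = 0) := by rw [e2] at hd ⊢; omega
      rw [if_neg hd1, if_pos hd]
      simp [asum, Prod.ext_iff]
      omega
  | case2 t d s0 s1 ht hd ih =>
      rw [fLoopB, dif_pos ht, if_neg hd, ih, mdig_pos ht]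
      have hd1 : PySem.Int.mod (d + 1) 2 = 0 := by rw [e2] at hd ⊢; omega
      rw [if_pos hd1, if_neg hd]
      simp [asum, Prod.ext_iff]
      omega
  | case3 t d s0 s1 ht =>
      rw [fLoopB, dif_neg ht, mdig_nonpos ht]
      simp [asum]

-- A's power-sum loop is the polynomial value
lemma foldV_aux (F : List Int) (m : Nat) : ∀ (k : Nat), F.length - k = m → k ≤ F.length →
    ∀ (r : Int),
    (PySem.List.pyRange ((k : Nat) : Int) ((F.length : Int)) 1).foldl
      (fun r i => r + PySem.List.pyGetD F i 0 * 45 ^ i.toNat) r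
    = r + 45 ^ k * pval (F.drop k) := by
  induction m with
  | zero =>
      intro k hm hk r
      rw [PySem.List.pyRange_one_eq_nil (by omega)]
      have hnil : F.drop k = [] := List.drop_eq_nil_of_le (by omega)
      simp [hnil, pval]
  | succ m ih =>
      intro k hm hk r
      have hlt : k < F.length := by omega
      rw [PySem.List.pyRange_one_cons (by omega)]
      simp only [List.foldl_cons]
      have hget : PySem.List.pyGetD F ((k : Nat) : Int) 0 = F[k] := by
        rw [PySem.List.pyGetD_natCast, List.getD_eq_getElem _ _ hlt]
      have hdrop : F.drop k = F[k] :: F.drop (k + 1) := List.drop_eq_getElem_cons hlt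
      rw [show ((k : Int) + 1) = (((k + 1 : Nat)) : Int) by push_cast; ring]
      rw [ih (k + 1) (by omega) (by omega)]
      rw [hdrop, pval, hget]
      simp only [Int.toNat_natCast, pow_succ]
      ring

-- the final power-sum loop of A, on the list [max] ++ digits (++ [min]), in closed form
lemma valstep (L : List Int) (mx mn m : Int) (hpv : pval L = m) :
    (PySem.List.pyRange 0 (((mx :: (if mn > 0 then L ++ [mn] else L)).length : Int)) 1).foldl
      (fun r i => r + PySem.List.pyGetD (mx :: (if mn > 0 then L ++ [mn] else L)) i 0 * 45 ^ i.toNat) 0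
    = if mn > 0 then mx + 45 * m + mn * 45 ^ (L.length + 1) else mx + 45 * m := by
  have h := foldV_aux (mx :: (if mn > 0 then L ++ [mn] else L)) _ 0 rfl (by omega) 0
  simp only [Nat.cast_zero, List.drop_zero] at h
  rw [h, pval]
  split_ifs with hmn
  · rw [pval_append, hpv]
    simp [pow_succ]
    ring
  · rw [hpv]
    simp

lemma main_eq (n : Int) : f n = f_alt n := by
  have hLa : fLoopA n [] = mdig (if n > 0 then n else 0) := by
    rw [fLoopA_eq, List.nil_append]
    by_cases h : n > 0
    · simp [h]
    · rw [mdig_nonpos h, if_neg h, mdig_nonpos (by omega)]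
  simp only [f, f_alt, hLa]
  set m := if n > 0 then n else 0 with hmdef
  set L := mdig m with hLdef
  have hm0 : 0 ≤ m := by rw [hmdef]; split <;> omega
  have hS := foldS_aux L L.length 0 (by omega) (by omega) 0 0
  simp only [Nat.cast_zero, zero_add, Nat.reduceMod, if_true, List.drop_zero] at hS
  rw [hS]
  have hB := foldB m 0 0 0
  have hmod0 : PySem.Int.mod (0 : Int) 2 = 0 := by
    rw [PySem.Int.mod_eq_emod_of_pos (by norm_num)]; norm_num
  rw [hmod0] at hB
  norm_num at hB
  rw [hB, ← hLdef]
  have htn : ((L.length : Int) + 1).toNat = L.length + 1 := by omega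
  have hpv : pval L = m := by rw [hLdef]; exact pval_mdig hm0
  rcases Nat.mod_two_eq_zero_or_one L.length with hp | hp
  · rw [asum_reverse, if_pos hp]
    rw [valstep L _ _ m hpv, htn]
  · rw [asum_reverse, if_neg (by omega)]
    rw [valstep L _ _ m hpv, htn]
    rw [max_comm, min_comm]

-- ===== VERDICT (by name: the statement is the Claim_ definition above) =====
theorem f_spec : Claim_equal_f := by
  intro n _; exact main_eq n
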